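-- pv_equiv track=rewrite | github.com/Julian-Schaefer/Competency-Extraction-API | app/text_processing_utils.py | remove_punctuation_from_tokenized_sentences
-- ===== SOURCE A (Python) =====
-- import string
-- from typing import List
--
-- def remove_punctuation_from_tokenized_sentences(tokenized_sentences: List[List[str]]) -> List[List[str]]:
--     """
--     Removes punctuation from a list of tokenized sentences. If a token only contains punctuation,
--     it is removed entirely. Hyphens are only removed if they appear at the start or the end of the token.
--     For example the hyphen in the token "H-Milch" will not be removed.
--     :param tokenized_sentences: A list of tokenized sentences
--     :type tokenized_sentences: List[List[str]]
--     :return: The list of tokenized sentences with punctuation removed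
--     :rtype: List[List[str]]
--     """
--     tokenized_sentences_without_punctuation = []
--     punct = string.punctuation.replace("-", "")
--     # remove punctuation except for hyphens
--     for sentence in tokenized_sentences:
--         tokenized_sentences_without_punctuation.append(
--             [token.translate(str.maketrans('', '', punct)) for token in sentence
--              if token.translate(str.maketrans('', '', punct)) != ""]
--         )
--     # remove hyphens that appear at the start or the end of the token
--     tokenized_sentences_without_punctuation_and_hyphens = []
--     for sentence in tokenized_sentences_without_punctuation:
--         tokenized_sentences_without_punctuation_and_hyphens.append(
--             [token.strip("-") for token in sentence if token.strip("-") != ""]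
--         )
--     return tokenized_sentences_without_punctuation_and_hyphens
-- ===== SOURCE B (Python) =====
-- import string
-- from typing import List
--
-- def remove_punctuation_from_tokenized_sentences(tokenized_sentences: List[List[str]]) -> List[List[str]]:
--     table = str.maketrans("", "", string.punctuation.replace("-", ""))
--     result = []
--     for sentence in tokenized_sentences:
--         cleaned_sentence = []
--         for token in sentence:
--             cleaned = token.translate(table).strip("-")
--             if cleaned != "":
--                 cleaned_sentence.append(cleaned)
--         result.append(cleaned_sentence)
--     return result
-- ===== Notes on version B (the rewrite author's own statement) =====
-- stated objective: simpler
-- what changed: Replaces A's two sequential passes (build an intermediate punctuation-free list, then a second filtering pass for hyphen-stripping) with a single pass that computes each token's final form once (translate table built once, translate+strip fused) and keeps it only if nonempty.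
import Mathlib
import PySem

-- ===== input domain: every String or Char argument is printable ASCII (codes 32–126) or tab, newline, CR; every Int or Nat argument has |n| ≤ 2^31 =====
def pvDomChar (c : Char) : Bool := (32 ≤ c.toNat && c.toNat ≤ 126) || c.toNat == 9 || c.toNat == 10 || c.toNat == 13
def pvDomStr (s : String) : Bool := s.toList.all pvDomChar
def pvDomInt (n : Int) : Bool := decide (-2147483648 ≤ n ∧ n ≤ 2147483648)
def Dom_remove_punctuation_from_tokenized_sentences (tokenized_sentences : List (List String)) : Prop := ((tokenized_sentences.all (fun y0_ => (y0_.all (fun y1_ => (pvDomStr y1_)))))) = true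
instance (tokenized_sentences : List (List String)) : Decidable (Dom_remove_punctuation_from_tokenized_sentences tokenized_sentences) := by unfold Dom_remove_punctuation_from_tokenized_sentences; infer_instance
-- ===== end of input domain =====

-- B fuses A's two passes (intermediate punctuation-free list, then hyphen-strip pass) into one
-- pass computing each token's final form once; return values proved equal (objective: simpler).

-- ===== PORT A =====
-- string.punctuation with "-" removed (the chars deleted by str.translate in both programs)
def pvPunct : List Char := "!\"#$%&'()*+,./:;<=>?@[\\]^_`{|}~".toList

-- token.translate(str.maketrans('', '', punct)): deletes every character in pvPunct (exact for this table)
def pvTranslate (t : String) : String := String.ofList (t.toList.filter (fun c => !pvPunct.contains c))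

def remove_punctuation_from_tokenized_sentences (tokenized_sentences : List (List String)) : List (List String) :=
  let tokenized_sentences_without_punctuation :=
    tokenized_sentences.map (fun sentence =>
      ((sentence.filter (fun token => pvTranslate token != "")).map (fun token => pvTranslate token)))
  tokenized_sentences_without_punctuation.map (fun sentence =>
    ((sentence.filter (fun token => PySem.Str.stripChars token "-" != "")).map
      (fun token => PySem.Str.stripChars token "-")))

-- ===== PORT B =====
def remove_punctuation_from_tokenized_sentences_alt (tokenized_sentences : List (List String)) : List (List String) :=
  tokenized_sentences.map (fun sentence =>
    sentence.filterMap (fun token =>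
      let cleaned := PySem.Str.stripChars (pvTranslate token) "-"
      if cleaned = "" then none else some cleaned))

-- ===== PRECONDITION & SPEC =====
def Spec_remove_punctuation_from_tokenized_sentences (tokenized_sentences : List (List String)) (out : List (List String)) : Prop := out = remove_punctuation_from_tokenized_sentences_alt tokenized_sentences
instance (tokenized_sentences : List (List String)) (out : List (List String)) : Decidable (Spec_remove_punctuation_from_tokenized_sentences tokenized_sentences out) := by unfold Spec_remove_punctuation_from_tokenized_sentences; infer_instance

-- ===== CLAIM (what is proved, stated in full; the proofs are below) =====
def Claim_equal_remove_punctuation_from_tokenized_sentences : Prop := ∀ (tokenized_sentences : List (List String)), Dom_remove_punctuation_from_tokenized_sentences tokenized_sentences → Spec_remove_punctuation_from_tokenized_sentences tokenized_sentences (remove_punctuation_from_tokenized_sentences tokenized_sentences)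

-- ===== LEMMAS AND PROOFS =====
theorem pv_sentence_fuse (s : List String) :
    ((s.filter (fun token => pvTranslate token != "")).map (fun token => pvTranslate token)
      |> (fun l => ((l.filter (fun token => PySem.Str.stripChars token "-" != "")).map
            (fun token => PySem.Str.stripChars token "-")))) =
    s.filterMap (fun token =>
      let cleaned := PySem.Str.stripChars (pvTranslate token) "-"
      if cleaned = "" then none else some cleaned) := by
  induction s with
  | nil => rfl
  | cons a t ih =>
    simp only [List.filterMap_cons]
    by_cases h1 : pvTranslate a = ""
    · simp only [List.filter_cons, h1, bne_self_eq_false, Bool.false_eq_true, if_false]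
      exact ih
    · by_cases h2 : PySem.Str.stripChars (pvTranslate a) "-" = ""
      · simp only [List.filter_cons, bne_iff_ne, ne_eq, h1, not_false_eq_true, if_pos,
          List.map_cons, h2]
        simpa using ih
      · simp only [List.filter_cons, bne_iff_ne, ne_eq, h1, not_false_eq_true, if_pos,
          List.map_cons, h2]
        simpa [h2] using ih

-- ===== VERDICT (by name: the statement is the Claim_ definition above) =====
theorem remove_punctuation_from_tokenized_sentences_spec : Claim_equal_remove_punctuation_from_tokenized_sentences := by
  intro ts _
  unfold Spec_remove_punctuation_from_tokenized_sentences
    remove_punctuation_from_tokenized_sentences remove_punctuation_from_tokenized_sentences_alt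
  simp only [List.map_map]
  exact List.map_congr_left (fun s _ => pv_sentence_fuse s)
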